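-- pv_equiv track=rewrite | github.com/hangzhaosbu/Leetcode | 3030-find-the-grid-of-region-average/3030-find-the-grid-of-region-average.py | resultGrid
-- ===== SOURCE A (Python) =====
-- from typing import List
--
-- def resultGrid(image: List[List[int]], threshold: int) -> List[List[int]]:
--     m, n = len(image), len(image[0])
--
--     res = [[[0 for _ in range(2)] for _ in range(n)] for _ in range(m)]
--
--     for i in range(m - 2):
--         for j in range(n - 2):
--             total = 0
--             valid = True
--
--             for ii in range(3):
--                 for jj in range(3):
--                     total += image[i + ii][j + jj]
--
--                     if ii > 0 and abs(image[i + ii][j + jj] - image[i + ii - 1][j + jj]) > threshold: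
--                         valid = False
--                         break
--
--                     if jj > 0 and abs(image[i + ii][j + jj] - image[i + ii][j + jj - 1]) > threshold:
--                         valid = False
--                         break
--
--                 if not valid:
--                     break
--
--             if not valid:
--                 continue
--
--             total //= 9
--             for ii in range(3):
--                 for jj in range(3):
--                     res[i + ii][j + jj][0] += total
--                     res[i + ii][j + jj][1] += 1
--
--
--     for i in range(m):
--         for j in range(n):
--             if res[i][j][1] != 0:
--                 image[i][j] = res[i][j][0]//res[i][j][1]
--
--     return image
-- ===== SOURCE B (Python) =====
-- from typing import List
--
-- def resultGrid(image: List[List[int]], threshold: int) -> List[List[int]]: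
--     m, n = len(image), len(image[0])
--
--     # run length of within-threshold horizontal edges ending at each cell
--     hrun = []
--     for i in range(m):
--         r = []
--         for j in range(n):
--             r.append(0 if j == 0 or abs(image[i][j] - image[i][j - 1]) > threshold
--                      else r[j - 1] + 1)
--         hrun.append(r)
--
--     # run length of within-threshold vertical edges ending at each cell
--     vrun = []
--     for i in range(m):
--         c = []
--         for j in range(n):
--             c.append(0 if i == 0 or abs(image[i][j] - image[i - 1][j]) > threshold
--                      else vrun[i - 1][j] + 1)
--         vrun.append(c)
--
--     # per-window average: win[a][b] is the region average when window (a,b) is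
--     # uniform (every internal edge within threshold, read off the run lengths), else None
--     win = []
--     for a in range(m - 2):
--         w = []
--         for b in range(n - 2):
--             if (hrun[a][b + 2] >= 2 and hrun[a + 1][b + 2] >= 2 and hrun[a + 2][b + 2] >= 2
--                     and vrun[a + 2][b] >= 2 and vrun[a + 2][b + 1] >= 2 and vrun[a + 2][b + 2] >= 2):
--                 w.append(sum(image[a + ii][b + jj] for ii in range(3) for jj in range(3)) // 9)
--             else:
--                 w.append(None)
--         win.append(w)
--
--     # gather: each cell averages the averages of the uniform windows covering it
--     out = []
--     for x in range(m):
--         row = list(image[x])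
--         for y in range(n):
--             s = 0
--             cnt = 0
--             for a in range(max(x - 2, 0), min(x, m - 3) + 1):
--                 for b in range(max(y - 2, 0), min(y, n - 3) + 1):
--                     if win[a][b] is not None:
--                         s += win[a][b]
--                         cnt += 1
--             if cnt:
--                 row[y] = s // cnt
--         out.append(row)
--     return out
-- ===== Notes on version B (the rewrite author's own statement) =====
-- stated objective: alternative
-- what changed: B replaces A's per-window break-out edge scan and scatter accumulation with run-length tables of within-threshold edges (window validity read as hrun/vrun >= 2), a per-window Option-average grid, and a gather pass where each cell sums the averages of the up-to-9 windows covering it; A mutates image in place, B builds fresh rows (equivalence is about the return value).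
-- outside the precondition, e.g. on resultGrid([[1, 2], [3]], 0): A returns [[1, 2], [3]], B raises IndexError
import Mathlib
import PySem

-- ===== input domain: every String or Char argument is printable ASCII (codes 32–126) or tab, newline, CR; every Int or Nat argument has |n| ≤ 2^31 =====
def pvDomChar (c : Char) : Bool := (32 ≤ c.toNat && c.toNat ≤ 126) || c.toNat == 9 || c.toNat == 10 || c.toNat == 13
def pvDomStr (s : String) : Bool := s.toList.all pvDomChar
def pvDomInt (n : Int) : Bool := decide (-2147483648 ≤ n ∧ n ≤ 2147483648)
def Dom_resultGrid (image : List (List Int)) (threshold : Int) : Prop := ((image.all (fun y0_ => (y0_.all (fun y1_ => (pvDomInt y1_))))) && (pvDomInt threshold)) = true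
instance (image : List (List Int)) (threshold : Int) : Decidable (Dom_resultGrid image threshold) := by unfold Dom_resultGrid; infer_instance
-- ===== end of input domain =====

-- B replaces A's per-window break-out edge scan and scatter accumulation with run-length
-- tables of within-threshold edges, a per-window Option-average grid and a per-cell gather
-- pass (objective: alternative). A mutates `image` in place; the equivalence proved here is
-- about the RETURN value only (B builds fresh rows).

-- ===== PORT A =====
-- image[i][j] via Python defaulting — exact for the non-negative in-range indices used
def pvGet (g : List (List Int)) (i j : Int) : Int :=
  PySem.List.pyGetD (PySem.List.pyGetD g i []) j 0

-- g[i][j] = f (g[i][j]) ; exact for the non-negative indices the loops use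
def pvModify {α : Type} (g : List (List α)) (i j : Int) (f : α → α) : List (List α) :=
  g.modify i.toNat (fun row => row.modify j.toNat f)

-- A's inner 3×3 double loop with its two `break`s (break emulated by the valid-flag guard:
-- once valid is False the remaining iterations do nothing, exactly like Python's break)
def pvWindowA (image : List (List Int)) (threshold i j : Int) : Int × Bool :=
  (PySem.List.pyRange 0 3).foldl (fun st ii =>
    if st.2 then
      (PySem.List.pyRange 0 3).foldl (fun st2 jj =>
        if st2.2 then
          let x := pvGet image (i + ii) (j + jj)
          let tot := st2.1 + x
          if ii > 0 ∧ |x - pvGet image (i + ii - 1) (j + jj)| > threshold then (tot, false)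
          else if jj > 0 ∧ |x - pvGet image (i + ii) (j + jj - 1)| > threshold then (tot, false)
          else (tot, true)
        else st2) st
    else st) ((0 : Int), true)

def resultGrid (image : List (List Int)) (threshold : Int) : List (List Int) :=
  let m : Int := image.length
  let n : Int := (PySem.List.pyGetD image 0 []).length
  let res0 : List (List (Int × Int)) :=
    (PySem.List.pyRange 0 m).map (fun _ => (PySem.List.pyRange 0 n).map (fun _ => ((0 : Int), (0 : Int))))
  let res := (PySem.List.pyRange 0 (m - 2)).foldl (fun res i =>
    (PySem.List.pyRange 0 (n - 2)).foldl (fun res j =>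
      let tv := pvWindowA image threshold i j
      if tv.2 then
        let total := PySem.Int.floordiv tv.1 9
        (PySem.List.pyRange 0 3).foldl (fun res ii =>
          (PySem.List.pyRange 0 3).foldl (fun res jj =>
            pvModify res (i + ii) (j + jj) (fun p => (p.1 + total, p.2 + 1))) res) res
      else res) res) res0
  -- final pass: A assigns into image itself and returns it
  (PySem.List.pyRange 0 m).foldl (fun out i =>
    (PySem.List.pyRange 0 n).foldl (fun out j =>
      let p := PySem.List.pyGetD (PySem.List.pyGetD res i []) j ((0 : Int), (0 : Int))
      if p.2 ≠ 0 then pvModify out i j (fun _ => PySem.Int.floordiv p.1 p.2) else out) out) image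

-- ===== PORT B =====
-- win[a][b] via Python defaulting — exact for the in-range indices used
def pvGetO (w : List (List (Option Int))) (a b : Int) : Option Int :=
  PySem.List.pyGetD (PySem.List.pyGetD w a []) b none

-- one row of the horizontal run-length table: r[j] = 0 if j=0 or the edge into column j
-- exceeds the threshold, else r[j-1]+1
def pvRunRow (image : List (List Int)) (threshold n i : Int) : List Int :=
  (PySem.List.pyRange 0 n).foldl (fun r j =>
    r ++ [if j = 0 ∨ |pvGet image i j - pvGet image i (j - 1)| > threshold then 0
          else PySem.List.pyGetD r (j - 1) 0 + 1]) []

def pvHrun (image : List (List Int)) (threshold n : Int) : List (List Int) :=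
  (PySem.List.pyRange 0 (image.length : Int)).foldl
    (fun h i => h ++ [pvRunRow image threshold n i]) []

-- vertical run-length table: row i reads row i-1 of the table built so far
def pvVrun (image : List (List Int)) (threshold n : Int) : List (List Int) :=
  (PySem.List.pyRange 0 (image.length : Int)).foldl (fun v i =>
    v ++ [(PySem.List.pyRange 0 n).foldl (fun c j =>
      c ++ [if i = 0 ∨ |pvGet image i j - pvGet image (i - 1) j| > threshold then 0
            else PySem.List.pyGetD (PySem.List.pyGetD v (i - 1) []) j 0 + 1]) []]) []

-- per-window average grid: win[a][b] = some (window sum // 9) when the six run-length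
-- readings certify every internal edge of the window, else none
def pvWin (image : List (List Int)) (threshold : Int) : List (List (Option Int)) :=
  let m : Int := image.length
  let n : Int := (PySem.List.pyGetD image 0 []).length
  let hrun := pvHrun image threshold n
  let vrun := pvVrun image threshold n
  (PySem.List.pyRange 0 (m - 2)).foldl (fun w a =>
    w ++ [(PySem.List.pyRange 0 (n - 2)).foldl (fun wr b =>
      wr ++ [if pvGet hrun a (b + 2) ≥ 2 ∧ pvGet hrun (a + 1) (b + 2) ≥ 2 ∧
                pvGet hrun (a + 2) (b + 2) ≥ 2 ∧ pvGet vrun (a + 2) b ≥ 2 ∧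
                pvGet vrun (a + 2) (b + 1) ≥ 2 ∧ pvGet vrun (a + 2) (b + 2) ≥ 2 then
               some (PySem.Int.floordiv (((PySem.List.pyRange 0 3).flatMap (fun ii =>
                 (PySem.List.pyRange 0 3).map (fun jj => pvGet image (a + ii) (b + jj)))).sum) 9)
             else none]) []]) []

def resultGrid_alt (image : List (List Int)) (threshold : Int) : List (List Int) :=
  let m : Int := image.length
  let n : Int := (PySem.List.pyGetD image 0 []).length
  let win := pvWin image threshold
  -- gather: each cell averages the averages of the uniform windows covering it
  (PySem.List.pyRange 0 m).foldl (fun out x =>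
    out ++ [(PySem.List.pyRange 0 n).foldl (fun row y =>
      let sc := (PySem.List.pyRange (max (x - 2) 0) (min x (m - 3) + 1)).foldl (fun sc a =>
        (PySem.List.pyRange (max (y - 2) 0) (min y (n - 3) + 1)).foldl (fun (sc : Int × Int) b =>
          match pvGetO win a b with
          | some v => (sc.1 + v, sc.2 + 1)
          | none => sc) sc) ((0 : Int), (0 : Int))
      if sc.2 ≠ 0 then PySem.List.pySetD row y (PySem.Int.floordiv sc.1 sc.2) else row)
      (PySem.List.pyGetD image x [])]) []

-- ===== PRECONDITION & SPEC =====
-- Pre_ excludes the empty image (A raises IndexError on image[0]) and images with a row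
-- shorter than the first row, on which A raises IndexError once a 3×3 window reads the
-- short row — and on which, when no window reaches it (m<3 or n<3), A still returns the
-- grid unchanged while B's run-length comprehension raises IndexError (see cites).
def Pre_resultGrid (image : List (List Int)) (threshold : Int) : Prop :=
  image ≠ [] ∧ ∀ row ∈ image, (PySem.List.pyGetD image 0 []).length ≤ row.length
instance (image : List (List Int)) (threshold : Int) : Decidable (Pre_resultGrid image threshold) := by
  unfold Pre_resultGrid; infer_instance

def pvWitness_resultGrid : List (List Int) × Int := ([[1, 2, 3], [2, 2, 2], [3, 2, 1]], 5)

def Spec_resultGrid (image : List (List Int)) (threshold : Int) (out : List (List Int)) : Prop := out = resultGrid_alt image threshold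
instance (image : List (List Int)) (threshold : Int) (out : List (List Int)) : Decidable (Spec_resultGrid image threshold out) := by unfold Spec_resultGrid; infer_instance

-- ===== CLAIM (what is proved, stated in full; the proofs are below) =====
def Claim_equal_resultGrid : Prop := ∀ (image : List (List Int)) (threshold : Int), Dom_resultGrid image threshold → Pre_resultGrid image threshold → Spec_resultGrid image threshold (resultGrid image threshold)

-- ===== LEMMAS AND PROOFS =====
-- ===== LEMMAS AND PROOFS =====

-- shorthand dimensions
def pvMi (image : List (List Int)) : Int := (image.length : Int)
def pvNi (image : List (List Int)) : Int := ((PySem.List.pyGetD image 0 []).length : Int)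

-- read of a pair grid (exactly the expression A's final pass uses)
def rdp (g : List (List (Int × Int))) (x y : Int) : Int × Int :=
  PySem.List.pyGetD (PySem.List.pyGetD g x []) y ((0 : Int), (0 : Int))

-- grid shape: m rows, every row of length n
def GShape {α : Type} (g : List (List α)) (m n : Nat) : Prop :=
  g.length = m ∧ ∀ (k : Nat) (h : k < g.length), (g[k]'h).length = n

theorem pvShape_modify {α : Type} {g : List (List α)} {m n : Nat} (i j : Int)
    (f : α → α) (hs : GShape g m n) : GShape (pvModify g i j f) m n := by
  obtain ⟨hl, hr⟩ := hs
  refine ⟨by simpa [pvModify] using hl, ?_⟩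
  intro k hk
  simp only [pvModify] at hk ⊢
  rw [List.getElem_modify]
  split
  · simpa using hr k (by simpa using hk)
  · exact hr k (by simpa using hk)

theorem rd_row_modify_ne {α : Type} (row : List α) (d : α) (f : α → α) {j y : Int}
    (hy : 0 ≤ y) (hj : 0 ≤ j) (hne : y ≠ j) :
    PySem.List.pyGetD (row.modify j.toNat f) y d = PySem.List.pyGetD row y d := by
  have h2 : j.toNat ≠ y.toNat := by omega
  rw [PySem.List.pyGetD_of_nonneg _ _ hy, PySem.List.pyGetD_of_nonneg _ _ hy,
      List.getD_eq_getElem?_getD, List.getD_eq_getElem?_getD, List.getElem?_modify_ne _ _ h2]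

theorem rd_row_modify_eq {α : Type} (row : List α) (d : α) (f : α → α) {j : Int}
    (hj : 0 ≤ j) (hlen : j.toNat < row.length) :
    PySem.List.pyGetD (row.modify j.toNat f) j d = f (PySem.List.pyGetD row j d) := by
  rw [PySem.List.pyGetD_of_nonneg _ _ hj, PySem.List.pyGetD_of_nonneg _ _ hj,
      List.getD_eq_getElem?_getD, List.getD_eq_getElem?_getD, List.getElem?_modify,
      List.getElem?_eq_getElem hlen]
  simp

-- a pvModify at a different cell does not change the read
theorem rd_modify_ne {α : Type} (g : List (List α)) (d : α) (f : α → α) {i j x y : Int}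
    (hx : 0 ≤ x) (hy : 0 ≤ y) (hi : 0 ≤ i) (hj : 0 ≤ j) (hne : x ≠ i ∨ y ≠ j) :
    PySem.List.pyGetD (PySem.List.pyGetD (pvModify g i j f) x []) y d =
      PySem.List.pyGetD (PySem.List.pyGetD g x []) y d := by
  unfold pvModify
  by_cases hxi : x = i
  · have hyj : y ≠ j := by tauto
    subst hxi
    rw [PySem.List.pyGetD_of_nonneg _ _ hx, PySem.List.pyGetD_of_nonneg _ _ hx,
        List.getD_eq_getElem?_getD, List.getD_eq_getElem?_getD, List.getElem?_modify]
    cases hrow : g[x.toNat]? with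
    | none => simp
    | some row =>
      simp only [Option.map_some, Option.getD_some, if_pos rfl]
      exact rd_row_modify_ne row d f hy hj hyj
  · rw [PySem.List.pyGetD_of_nonneg _ _ hx, PySem.List.pyGetD_of_nonneg _ _ hx,
        List.getD_eq_getElem?_getD, List.getD_eq_getElem?_getD,
        List.getElem?_modify_ne _ _ (by omega : i.toNat ≠ x.toNat)]

-- a pvModify at the read cell applies f (cell in range)
theorem rd_modify_eq {α : Type} (g : List (List α)) (d : α) (f : α → α) {i j : Int}
    (hi : 0 ≤ i) (hj : 0 ≤ j) (hilen : i.toNat < g.length)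
    (hjlen : j.toNat < (g[i.toNat]'hilen).length) :
    PySem.List.pyGetD (PySem.List.pyGetD (pvModify g i j f) i []) j d =
      f (PySem.List.pyGetD (PySem.List.pyGetD g i []) j d) := by
  unfold pvModify
  rw [PySem.List.pyGetD_of_nonneg _ _ hi, PySem.List.pyGetD_of_nonneg _ _ hi,
      List.getD_eq_getElem?_getD, List.getD_eq_getElem?_getD, List.getElem?_modify,
      List.getElem?_eq_getElem hilen]
  simp only [Option.map_some, Option.getD_some, if_pos rfl]
  exact rd_row_modify_eq _ d f hj hjlen

theorem hrange3 : PySem.List.pyRange 0 3 = [0, 1, 2] := by decide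

-- the nine cells of the window whose top-left corner is (a, b)
def cellList (a b : Int) : List (Int × Int) :=
  [(a+0,b+0),(a+0,b+1),(a+0,b+2),(a+1,b+0),(a+1,b+1),(a+1,b+2),(a+2,b+0),(a+2,b+1),(a+2,b+2)]

theorem cellList_count (a b x y : Int) :
    (cellList a b).count (x, y) =
      if a ≤ x ∧ x ≤ a + 2 ∧ b ≤ y ∧ y ≤ b + 2 then 1 else 0 := by
  simp only [cellList, List.count_cons, List.count_nil, beq_iff_eq, Prod.mk.injEq]
  split_ifs <;> omega

theorem cellList_mem (a b : Int) (c : Int × Int) (hc : c ∈ cellList a b) :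
    (c.1 = a ∨ c.1 = a + 1 ∨ c.1 = a + 2) ∧ (c.2 = b ∨ c.2 = b + 1 ∨ c.2 = b + 2) := by
  simp only [cellList, List.mem_cons, List.not_mem_nil, or_false] at hc
  rcases hc with h|h|h|h|h|h|h|h|h <;> subst h <;> constructor <;> simp <;> omega
-- the twelve internal-edge conditions, in A's scan order: okH i j = edge into column j of
-- row i is within threshold, okV i j = edge into row i of column j
def okH (image : List (List Int)) (t i j : Int) : Bool :=
  decide (|pvGet image i j - pvGet image i (j - 1)| ≤ t)
def okV (image : List (List Int)) (t i j : Int) : Bool :=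
  decide (|pvGet image i j - pvGet image (i - 1) j| ≤ t)

def validW (image : List (List Int)) (t a b : Int) : Bool :=
  okH image t a (b+1) && okH image t a (b+2) &&
  okH image t (a+1) (b+1) && okH image t (a+1) (b+2) &&
  okH image t (a+2) (b+1) && okH image t (a+2) (b+2) &&
  okV image t (a+1) b && okV image t (a+1) (b+1) && okV image t (a+1) (b+2) &&
  okV image t (a+2) b && okV image t (a+2) (b+1) && okV image t (a+2) (b+2)

def win9 (image : List (List Int)) (a b : Int) : Int :=
  ((PySem.List.pyRange 0 3).flatMap (fun ii =>
    (PySem.List.pyRange 0 3).map (fun jj => pvGet image (a + ii) (b + jj)))).sum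

def avgW (image : List (List Int)) (a b : Int) : Int := PySem.Int.floordiv (win9 image a b) 9

set_option maxHeartbeats 2000000 in
theorem pvWindowA_char (image : List (List Int)) (t i j : Int) :
    (pvWindowA image t i j).2 = validW image t i j ∧
      (validW image t i j = true → (pvWindowA image t i j).1 = win9 image i j) := by
  have h01 : (0 : Int) < 1 := by norm_num
  have h02 : (0 : Int) < 2 := by norm_num
  have r1 : i + 1 + 1 = i + 2 := by ring
  have r2 : j + 1 + 1 = j + 2 := by ring
  have r3 : i + 1 - 1 = i := by ring
  have r4 : i + 2 - 1 = i + 1 := by ring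
  have r5 : j + 1 - 1 = j := by ring
  have r6 : j + 2 - 1 = j + 1 := by ring
  by_cases h1 : |pvGet image (i) (j + 1) - pvGet image (i) (j)| ≤ t
  case neg =>
    have hv : (pvWindowA image t i j).2 = false := by
      simp [pvWindowA, hrange3, h01, h02, add_zero, r1, r2, r3, r4, r5, r6, not_le.mp h1]
    have hnv : validW image t i j = false := by
      simp [validW, okH, okV, r1, r2, r3, r4, r5, r6, h1]
    exact ⟨by rw [hv, hnv], fun hval => absurd hval (by simp [hnv])⟩
  by_cases h2 : |pvGet image (i) (j + 2) - pvGet image (i) (j + 1)| ≤ t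
  case neg =>
    have hv : (pvWindowA image t i j).2 = false := by
      simp [pvWindowA, hrange3, h01, h02, add_zero, r1, r2, r3, r4, r5, r6, not_lt.mpr h1, not_le.mp h2]
    have hnv : validW image t i j = false := by
      simp [validW, okH, okV, r1, r2, r3, r4, r5, r6, h2]
    exact ⟨by rw [hv, hnv], fun hval => absurd hval (by simp [hnv])⟩
  by_cases h3 : |pvGet image (i + 1) (j) - pvGet image (i) (j)| ≤ t
  case neg =>
    have hv : (pvWindowA image t i j).2 = false := by
      simp [pvWindowA, hrange3, h01, h02, add_zero, r1, r2, r3, r4, r5, r6, not_lt.mpr h1, not_lt.mpr h2, not_le.mp h3]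
    have hnv : validW image t i j = false := by
      simp [validW, okH, okV, r1, r2, r3, r4, r5, r6, h3]
    exact ⟨by rw [hv, hnv], fun hval => absurd hval (by simp [hnv])⟩
  by_cases h4 : |pvGet image (i + 1) (j + 1) - pvGet image (i) (j + 1)| ≤ t
  case neg =>
    have hv : (pvWindowA image t i j).2 = false := by
      simp [pvWindowA, hrange3, h01, h02, add_zero, r1, r2, r3, r4, r5, r6, not_lt.mpr h1, not_lt.mpr h2, not_lt.mpr h3, not_le.mp h4]
    have hnv : validW image t i j = false := by
      simp [validW, okH, okV, r1, r2, r3, r4, r5, r6, h4]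
    exact ⟨by rw [hv, hnv], fun hval => absurd hval (by simp [hnv])⟩
  by_cases h5 : |pvGet image (i + 1) (j + 1) - pvGet image (i + 1) (j)| ≤ t
  case neg =>
    have hv : (pvWindowA image t i j).2 = false := by
      simp [pvWindowA, hrange3, h01, h02, add_zero, r1, r2, r3, r4, r5, r6, not_lt.mpr h1, not_lt.mpr h2, not_lt.mpr h3, not_lt.mpr h4, not_le.mp h5]
    have hnv : validW image t i j = false := by
      simp [validW, okH, okV, r1, r2, r3, r4, r5, r6, h5]
    exact ⟨by rw [hv, hnv], fun hval => absurd hval (by simp [hnv])⟩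
  by_cases h6 : |pvGet image (i + 1) (j + 2) - pvGet image (i) (j + 2)| ≤ t
  case neg =>
    have hv : (pvWindowA image t i j).2 = false := by
      simp [pvWindowA, hrange3, h01, h02, add_zero, r1, r2, r3, r4, r5, r6, not_lt.mpr h1, not_lt.mpr h2, not_lt.mpr h3, not_lt.mpr h4, not_lt.mpr h5, not_le.mp h6]
    have hnv : validW image t i j = false := by
      simp [validW, okH, okV, r1, r2, r3, r4, r5, r6, h6]
    exact ⟨by rw [hv, hnv], fun hval => absurd hval (by simp [hnv])⟩
  by_cases h7 : |pvGet image (i + 1) (j + 2) - pvGet image (i + 1) (j + 1)| ≤ t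
  case neg =>
    have hv : (pvWindowA image t i j).2 = false := by
      simp [pvWindowA, hrange3, h01, h02, add_zero, r1, r2, r3, r4, r5, r6, not_lt.mpr h1, not_lt.mpr h2, not_lt.mpr h3, not_lt.mpr h4, not_lt.mpr h5, not_lt.mpr h6, not_le.mp h7]
    have hnv : validW image t i j = false := by
      simp [validW, okH, okV, r1, r2, r3, r4, r5, r6, h7]
    exact ⟨by rw [hv, hnv], fun hval => absurd hval (by simp [hnv])⟩
  by_cases h8 : |pvGet image (i + 2) (j) - pvGet image (i + 1) (j)| ≤ t
  case neg =>
    have hv : (pvWindowA image t i j).2 = false := by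
      simp [pvWindowA, hrange3, h01, h02, add_zero, r1, r2, r3, r4, r5, r6, not_lt.mpr h1, not_lt.mpr h2, not_lt.mpr h3, not_lt.mpr h4, not_lt.mpr h5, not_lt.mpr h6, not_lt.mpr h7, not_le.mp h8]
    have hnv : validW image t i j = false := by
      simp [validW, okH, okV, r1, r2, r3, r4, r5, r6, h8]
    exact ⟨by rw [hv, hnv], fun hval => absurd hval (by simp [hnv])⟩
  by_cases h9 : |pvGet image (i + 2) (j + 1) - pvGet image (i + 1) (j + 1)| ≤ t
  case neg =>
    have hv : (pvWindowA image t i j).2 = false := by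
      simp [pvWindowA, hrange3, h01, h02, add_zero, r1, r2, r3, r4, r5, r6, not_lt.mpr h1, not_lt.mpr h2, not_lt.mpr h3, not_lt.mpr h4, not_lt.mpr h5, not_lt.mpr h6, not_lt.mpr h7, not_lt.mpr h8, not_le.mp h9]
    have hnv : validW image t i j = false := by
      simp [validW, okH, okV, r1, r2, r3, r4, r5, r6, h9]
    exact ⟨by rw [hv, hnv], fun hval => absurd hval (by simp [hnv])⟩
  by_cases h10 : |pvGet image (i + 2) (j + 1) - pvGet image (i + 2) (j)| ≤ t
  case neg =>
    have hv : (pvWindowA image t i j).2 = false := by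
      simp [pvWindowA, hrange3, h01, h02, add_zero, r1, r2, r3, r4, r5, r6, not_lt.mpr h1, not_lt.mpr h2, not_lt.mpr h3, not_lt.mpr h4, not_lt.mpr h5, not_lt.mpr h6, not_lt.mpr h7, not_lt.mpr h8, not_lt.mpr h9, not_le.mp h10]
    have hnv : validW image t i j = false := by
      simp [validW, okH, okV, r1, r2, r3, r4, r5, r6, h10]
    exact ⟨by rw [hv, hnv], fun hval => absurd hval (by simp [hnv])⟩
  by_cases h11 : |pvGet image (i + 2) (j + 2) - pvGet image (i + 1) (j + 2)| ≤ t
  case neg =>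
    have hv : (pvWindowA image t i j).2 = false := by
      simp [pvWindowA, hrange3, h01, h02, add_zero, r1, r2, r3, r4, r5, r6, not_lt.mpr h1, not_lt.mpr h2, not_lt.mpr h3, not_lt.mpr h4, not_lt.mpr h5, not_lt.mpr h6, not_lt.mpr h7, not_lt.mpr h8, not_lt.mpr h9, not_lt.mpr h10, not_le.mp h11]
    have hnv : validW image t i j = false := by
      simp [validW, okH, okV, r1, r2, r3, r4, r5, r6, h11]
    exact ⟨by rw [hv, hnv], fun hval => absurd hval (by simp [hnv])⟩
  by_cases h12 : |pvGet image (i + 2) (j + 2) - pvGet image (i + 2) (j + 1)| ≤ t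
  case neg =>
    have hv : (pvWindowA image t i j).2 = false := by
      simp [pvWindowA, hrange3, h01, h02, add_zero, r1, r2, r3, r4, r5, r6, not_lt.mpr h1, not_lt.mpr h2, not_lt.mpr h3, not_lt.mpr h4, not_lt.mpr h5, not_lt.mpr h6, not_lt.mpr h7, not_lt.mpr h8, not_lt.mpr h9, not_lt.mpr h10, not_lt.mpr h11, not_le.mp h12]
    have hnv : validW image t i j = false := by
      simp [validW, okH, okV, r1, r2, r3, r4, r5, r6, h12]
    exact ⟨by rw [hv, hnv], fun hval => absurd hval (by simp [hnv])⟩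
  have hval : validW image t i j = true := by
    simp [validW, okH, okV, r1, r2, r3, r4, r5, r6, h1, h2, h3, h4, h5, h6, h7, h8, h9, h10, h11, h12]
  constructor
  · have hv : (pvWindowA image t i j).2 = true := by
      simp [pvWindowA, hrange3, h01, h02, add_zero, r1, r2, r3, r4, r5, r6, not_lt.mpr h1, not_lt.mpr h2, not_lt.mpr h3, not_lt.mpr h4, not_lt.mpr h5, not_lt.mpr h6, not_lt.mpr h7, not_lt.mpr h8, not_lt.mpr h9, not_lt.mpr h10, not_lt.mpr h11, not_lt.mpr h12]
    rw [hv, hval]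
  · intro _
    have hsum : (pvWindowA image t i j).1 =
        pvGet image i j + pvGet image i (j+1) + pvGet image i (j+2) +
        pvGet image (i+1) j + pvGet image (i+1) (j+1) + pvGet image (i+1) (j+2) +
        pvGet image (i+2) j + pvGet image (i+2) (j+1) + pvGet image (i+2) (j+2) := by
      simp [pvWindowA, hrange3, h01, h02, add_zero, r1, r2, r3, r4, r5, r6, not_lt.mpr h1, not_lt.mpr h2, not_lt.mpr h3, not_lt.mpr h4, not_lt.mpr h5, not_lt.mpr h6, not_lt.mpr h7, not_lt.mpr h8, not_lt.mpr h9, not_lt.mpr h10, not_lt.mpr h11, not_lt.mpr h12]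
    rw [hsum]
    simp only [win9, hrange3, List.flatMap_cons, List.flatMap_nil, List.map_cons,
      List.map_nil, List.append_nil, List.sum_cons, List.sum_nil, List.sum_append, add_zero]
    ring
-- per-window contribution of window (a,b) to cell (x,y)
def dS (image : List (List Int)) (t x y a b : Int) : Int :=
  if validW image t a b = true ∧ a ≤ x ∧ x ≤ a + 2 ∧ b ≤ y ∧ y ≤ b + 2 then avgW image a b else 0
def dC (image : List (List Int)) (t x y a b : Int) : Int :=
  if validW image t a b = true ∧ a ≤ x ∧ x ≤ a + 2 ∧ b ≤ y ∧ y ≤ b + 2 then 1 else 0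

-- total contribution of all windows to cell (x,y)
def Ssum (image : List (List Int)) (t x y : Int) : Int :=
  ((PySem.List.pyRange 0 (pvMi image - 2)).map (fun a =>
    ((PySem.List.pyRange 0 (pvNi image - 2)).map (fun b => dS image t x y a b)).sum)).sum
def Csum (image : List (List Int)) (t x y : Int) : Int :=
  ((PySem.List.pyRange 0 (pvMi image - 2)).map (fun a =>
    ((PySem.List.pyRange 0 (pvNi image - 2)).map (fun b => dC image t x y a b)).sum)).sum

def Nn (image : List (List Int)) : Nat := (PySem.List.pyGetD image 0 []).length

def indW (a b x y : Int) : Int := if a ≤ x ∧ x ≤ a + 2 ∧ b ≤ y ∧ y ≤ b + 2 then 1 else 0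

-- A's 9-cell accumulation, and its reformulation as a fold over the cell list
def winUpd (g : List (List (Int × Int))) (a b v : Int) : List (List (Int × Int)) :=
  (PySem.List.pyRange 0 3).foldl (fun res ii =>
    (PySem.List.pyRange 0 3).foldl (fun res jj =>
      pvModify res (a + ii) (b + jj) (fun p => (p.1 + v, p.2 + 1))) res) g

theorem winUpd_cells (g : List (List (Int × Int))) (a b v : Int) :
    winUpd g a b v =
      (cellList a b).foldl (fun g c => pvModify g c.1 c.2 (fun p => (p.1 + v, p.2 + 1))) g := by
  rw [winUpd, hrange3]
  rfl

theorem gshape_foldl_cells {m n : Nat} (v : Int) :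
    ∀ (cs : List (Int × Int)) (g : List (List (Int × Int))), GShape g m n →
      GShape (cs.foldl (fun g c => pvModify g c.1 c.2 (fun p => (p.1 + v, p.2 + 1))) g) m n := by
  intro cs
  induction cs with
  | nil => intro g hs; simpa using hs
  | cons c cs ih =>
    intro g hs
    simp only [List.foldl_cons]
    exact ih _ (pvShape_modify _ _ _ hs)

theorem rdp_foldl_cells {m n : Nat} (v : Int) :
    ∀ (cs : List (Int × Int)) (g : List (List (Int × Int))), GShape g m n →
      (∀ c ∈ cs, 0 ≤ c.1 ∧ c.1 < (m : Int) ∧ 0 ≤ c.2 ∧ c.2 < (n : Int)) →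
      ∀ (x y : Int), 0 ≤ x → x < (m : Int) → 0 ≤ y → y < (n : Int) →
      rdp (cs.foldl (fun g c => pvModify g c.1 c.2 (fun p => (p.1 + v, p.2 + 1))) g) x y
        = ((rdp g x y).1 + v * (cs.count (x, y) : Int), (rdp g x y).2 + (cs.count (x, y) : Int)) := by
  intro cs
  induction cs with
  | nil => intro g hs hcs x y hx0 hxm hy0 hyn; simp
  | cons c cs ih =>
    intro g hs hcs x y hx0 hxm hy0 hyn
    obtain ⟨hc0, hcm, hc2, hcn⟩ := hcs c List.mem_cons_self
    simp only [List.foldl_cons, List.count_cons]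
    rw [ih _ (pvShape_modify _ _ _ hs) (fun d hd => hcs d (List.mem_cons_of_mem _ hd)) x y hx0 hxm hy0 hyn]
    by_cases hceq : c = (x, y)
    · have hceq1 : c.1 = x := by rw [hceq]
      have hceq2 : c.2 = y := by rw [hceq]
      have hilen : c.1.toNat < g.length := by
        have := hs.1; omega
      have hjlen : c.2.toNat < (g[c.1.toNat]'hilen).length := by
        have := hs.2 c.1.toNat hilen; omega
      have hrd : rdp (pvModify g c.1 c.2 (fun p => (p.1 + v, p.2 + 1))) x y
          = ((rdp g x y).1 + v, (rdp g x y).2 + 1) := by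
        rw [← hceq1, ← hceq2]
        simp only [rdp]
        exact rd_modify_eq g _ _ hc0 hc2 hilen hjlen
      have hcnt : (c == (x, y)) = true := by simp [hceq]
      rw [hrd, hcnt]
      simp only [if_true]
      refine Prod.ext ?_ ?_ <;> simp <;> push_cast <;> ring
    · have hne : x ≠ c.1 ∨ y ≠ c.2 := by
        by_contra h
        push_neg at h
        exact hceq (by cases c; simp_all)
      have hrd : rdp (pvModify g c.1 c.2 (fun p => (p.1 + v, p.2 + 1))) x y = rdp g x y :=
        rd_modify_ne g _ _ hx0 hy0 hc0 hc2 hne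
      have hcnt : (c == (x, y)) = false := by simp [hceq]
      rw [hrd, hcnt]
      simp
theorem cellList_bounds {m n : Nat} (a b : Int) (ha0 : 0 ≤ a) (ham : a + 2 < (m : Int))
    (hb0 : 0 ≤ b) (hbn : b + 2 < (n : Int)) :
    ∀ c ∈ cellList a b, 0 ≤ c.1 ∧ c.1 < (m : Int) ∧ 0 ≤ c.2 ∧ c.2 < (n : Int) := by
  intro c hc
  obtain ⟨h1, h2⟩ := cellList_mem a b c hc
  omega

theorem winUpd_shape {m n : Nat} (g : List (List (Int × Int))) (a b v : Int)
    (hs : GShape g m n) : GShape (winUpd g a b v) m n := by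
  rw [winUpd_cells]
  exact gshape_foldl_cells v _ g hs

theorem winUpd_effect {m n : Nat} (g : List (List (Int × Int))) (a b v : Int)
    (hs : GShape g m n) (ha0 : 0 ≤ a) (ham : a + 2 < (m : Int)) (hb0 : 0 ≤ b)
    (hbn : b + 2 < (n : Int)) (x y : Int) (hx0 : 0 ≤ x) (hxm : x < (m : Int))
    (hy0 : 0 ≤ y) (hyn : y < (n : Int)) :
    rdp (winUpd g a b v) x y
      = ((rdp g x y).1 + v * indW a b x y, (rdp g x y).2 + indW a b x y) := by
  rw [winUpd_cells,
    rdp_foldl_cells v _ g hs (cellList_bounds a b ha0 ham hb0 hbn) x y hx0 hxm hy0 hyn,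
    cellList_count]
  simp [indW, apply_ite]

-- A's per-window step (syntactically the body of A's window loop)
def stepA (image : List (List Int)) (t i : Int) (res : List (List (Int × Int))) (j : Int) :
    List (List (Int × Int)) :=
  if (pvWindowA image t i j).2 then
    (PySem.List.pyRange 0 3).foldl (fun res ii =>
      (PySem.List.pyRange 0 3).foldl (fun res jj =>
        pvModify res (i + ii) (j + jj)
          (fun p => (p.1 + PySem.Int.floordiv (pvWindowA image t i j).1 9, p.2 + 1))) res) res
  else res

theorem stepA_shape {m n : Nat} (image : List (List Int)) (t i j : Int)
    (g : List (List (Int × Int))) (hs : GShape g m n) : GShape (stepA image t i g j) m n := by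
  unfold stepA
  split
  · exact winUpd_shape g i j _ hs
  · exact hs

theorem stepA_effect {m n : Nat} (image : List (List Int)) (t i j : Int)
    (g : List (List (Int × Int))) (hs : GShape g m n)
    (hi0 : 0 ≤ i) (him : i + 2 < (m : Int)) (hj0 : 0 ≤ j) (hjn : j + 2 < (n : Int))
    (x y : Int) (hx0 : 0 ≤ x) (hxm : x < (m : Int)) (hy0 : 0 ≤ y) (hyn : y < (n : Int)) :
    rdp (stepA image t i g j) x y
      = ((rdp g x y).1 + dS image t x y i j, (rdp g x y).2 + dC image t x y i j) := by
  unfold stepA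
  cases hb : validW image t i j with
  | false =>
    rw [(pvWindowA_char image t i j).1, hb]
    simp [dS, dC, hb]
  | true =>
    rw [(pvWindowA_char image t i j).1, hb]
    simp only [if_true]
    have havg : PySem.Int.floordiv (pvWindowA image t i j).1 9 = avgW image i j := by
      rw [(pvWindowA_char image t i j).2 hb]; rfl
    rw [havg]
    rw [show ((PySem.List.pyRange 0 3).foldl (fun res ii =>
      (PySem.List.pyRange 0 3).foldl (fun res jj =>
        pvModify res (i + ii) (j + jj) (fun p => (p.1 + avgW image i j, p.2 + 1))) res) g)
      = winUpd g i j (avgW image i j) from rfl]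
    rw [winUpd_effect g i j _ hs hi0 him hj0 hjn x y hx0 hxm hy0 hyn]
    simp [dS, dC, indW, hb, mul_ite]

theorem scatter_inner {m n : Nat} (image : List (List Int)) (t i : Int)
    (hi0 : 0 ≤ i) (him : i + 2 < (m : Int)) :
    ∀ (bs : List Int), (∀ b ∈ bs, 0 ≤ b ∧ b + 2 < (n : Int)) →
      ∀ g, GShape g m n →
      GShape (bs.foldl (stepA image t i) g) m n ∧
      ∀ (x y : Int), 0 ≤ x → x < (m : Int) → 0 ≤ y → y < (n : Int) →
        rdp (bs.foldl (stepA image t i) g) x y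
          = ((rdp g x y).1 + (bs.map (fun b => dS image t x y i b)).sum,
             (rdp g x y).2 + (bs.map (fun b => dC image t x y i b)).sum) := by
  intro bs
  induction bs with
  | nil => intro hbs g hs; exact ⟨hs, by simp⟩
  | cons b bs ih =>
    intro hbs g hs
    obtain ⟨hb0, hbn⟩ := hbs b List.mem_cons_self
    simp only [List.foldl_cons, List.map_cons, List.sum_cons]
    obtain ⟨ihs, ihr⟩ := ih (fun d hd => hbs d (List.mem_cons_of_mem _ hd))
      (stepA image t i g b) (stepA_shape image t i b g hs)
    refine ⟨ihs, ?_⟩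
    intro x y hx0 hxm hy0 hyn
    rw [ihr x y hx0 hxm hy0 hyn,
      stepA_effect image t i b g hs hi0 him hb0 hbn x y hx0 hxm hy0 hyn]
    refine Prod.ext ?_ ?_ <;> simp <;> ring

theorem scatter_outer {m n : Nat} (image : List (List Int)) (t : Int) (hn : (n : Int) = pvNi image) :
    ∀ (as : List Int), (∀ a ∈ as, 0 ≤ a ∧ a + 2 < (m : Int)) →
      ∀ g, GShape g m n →
      GShape (as.foldl (fun res i => (PySem.List.pyRange 0 (pvNi image - 2)).foldl (stepA image t i) res) g) m n ∧
      ∀ (x y : Int), 0 ≤ x → x < (m : Int) → 0 ≤ y → y < (n : Int) →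
        rdp (as.foldl (fun res i => (PySem.List.pyRange 0 (pvNi image - 2)).foldl (stepA image t i) res) g) x y
          = ((rdp g x y).1 + (as.map (fun a =>
                ((PySem.List.pyRange 0 (pvNi image - 2)).map (fun b => dS image t x y a b)).sum)).sum,
             (rdp g x y).2 + (as.map (fun a =>
                ((PySem.List.pyRange 0 (pvNi image - 2)).map (fun b => dC image t x y a b)).sum)).sum) := by
  intro as
  induction as with
  | nil => intro has g hs; exact ⟨hs, by simp⟩
  | cons a as ih =>
    intro has g hs
    obtain ⟨ha0, ham⟩ := has a List.mem_cons_self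
    have hbs : ∀ b ∈ PySem.List.pyRange 0 (pvNi image - 2), 0 ≤ b ∧ b + 2 < (n : Int) := by
      intro b hb
      rw [PySem.List.mem_pyRange_one] at hb
      omega
    obtain ⟨hs1, hr1⟩ := scatter_inner image t a ha0 ham _ hbs g hs
    simp only [List.foldl_cons, List.map_cons, List.sum_cons]
    obtain ⟨ihs, ihr⟩ := ih (fun d hd => has d (List.mem_cons_of_mem _ hd)) _ hs1
    refine ⟨ihs, ?_⟩
    intro x y hx0 hxm hy0 hyn
    rw [ihr x y hx0 hxm hy0 hyn, hr1 x y hx0 hxm hy0 hyn]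
    refine Prod.ext ?_ ?_ <;> simp <;> ring
def res0D (image : List (List Int)) : List (List (Int × Int)) :=
  (PySem.List.pyRange 0 (pvMi image)).map (fun _ =>
    (PySem.List.pyRange 0 (pvNi image)).map (fun _ => ((0 : Int), (0 : Int))))

def resD (image : List (List Int)) (t : Int) : List (List (Int × Int)) :=
  (PySem.List.pyRange 0 (pvMi image - 2)).foldl (fun res i =>
    (PySem.List.pyRange 0 (pvNi image - 2)).foldl (stepA image t i) res) (res0D image)

theorem res0_shape (image : List (List Int)) : GShape (res0D image) image.length (Nn image) := by
  constructor
  · simp [res0D, PySem.List.length_pyRange_one, pvMi]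
  · intro k hk
    simp [res0D, PySem.List.length_pyRange_one, pvNi, Nn]

theorem res0_read (image : List (List Int)) (x y : Int) (hx0 : 0 ≤ x) (hxm : x < pvMi image)
    (hy0 : 0 ≤ y) (hyn : y < pvNi image) :
    rdp (res0D image) x y = ((0 : Int), (0 : Int)) := by
  unfold rdp res0D
  rw [PySem.List.pyGetD_map_pyRange_of_nonneg _ _ _ _ hx0 hxm,
      PySem.List.pyGetD_map_pyRange_of_nonneg _ _ _ _ hy0 hyn]

theorem resD_char (image : List (List Int)) (t : Int) :
    GShape (resD image t) image.length (Nn image) ∧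
    ∀ (x y : Int), 0 ≤ x → x < pvMi image → 0 ≤ y → y < pvNi image →
      rdp (resD image t) x y = (Ssum image t x y, Csum image t x y) := by
  have has : ∀ a ∈ PySem.List.pyRange 0 (pvMi image - 2), 0 ≤ a ∧ a + 2 < ((image.length : Nat) : Int) := by
    intro a ha
    rw [PySem.List.mem_pyRange_one] at ha
    simp only [pvMi] at ha ⊢
    omega
  have hn : ((Nn image : Nat) : Int) = pvNi image := rfl
  obtain ⟨hs, hr⟩ := scatter_outer image t hn (PySem.List.pyRange 0 (pvMi image - 2)) has
    (res0D image) (res0_shape image)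
  refine ⟨hs, ?_⟩
  intro x y hx0 hxm hy0 hyn
  have hxm' : x < ((image.length : Nat) : Int) := hxm
  have hyn' : y < ((Nn image : Nat) : Int) := hyn
  rw [resD, hr x y hx0 hxm' hy0 hyn', res0_read image x y hx0 hxm hy0 hyn]
  simp [Ssum, Csum]

-- ===== A's final pass =====

-- row-length-preserving shape relative to the input grid
def RShape (image g : List (List Int)) : Prop :=
  g.length = image.length ∧
  ∀ (k : Nat) (h1 : k < g.length) (h2 : k < image.length), (g[k]'h1).length = (image[k]'h2).length

theorem rshape_modify {image g : List (List Int)} (i j : Int) (f : Int → Int)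
    (hs : RShape image g) : RShape image (pvModify g i j f) := by
  obtain ⟨hl, hr⟩ := hs
  refine ⟨by simpa [pvModify] using hl, ?_⟩
  intro k h1 h2
  simp only [pvModify] at h1 ⊢
  rw [List.getElem_modify]
  split
  · simpa using hr k (by simpa using h1) h2
  · exact hr k (by simpa using h1) h2

-- Pre_ gives every row length ≥ the first row's
theorem pre_rows (image : List (List Int)) (t : Int) (hpre : Pre_resultGrid image t) :
    ∀ (k : Nat) (h : k < image.length), Nn image ≤ (image[k]'h).length := by
  intro k h
  exact hpre.2 _ (List.getElem_mem h)

-- the canonical final-pass step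
def stepFin (image : List (List Int)) (t i : Int) (out : List (List Int)) (j : Int) :
    List (List Int) :=
  if Csum image t i j ≠ 0 then
    pvModify out i j (fun _ => PySem.Int.floordiv (Ssum image t i j) (Csum image t i j))
  else out

theorem stepFin_shape (image : List (List Int)) (t i j : Int) (g : List (List Int))
    (hs : RShape image g) : RShape image (stepFin image t i g j) := by
  unfold stepFin
  split
  · exact rshape_modify i j _ hs
  · exact hs

theorem stepFin_read (image : List (List Int)) (t : Int) (hpre : Pre_resultGrid image t)
    (i b x y : Int) (g : List (List Int)) (hs : RShape image g)
    (hi0 : 0 ≤ i) (him : i < pvMi image) (hb0 : 0 ≤ b) (hbn : b < pvNi image)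
    (hx0 : 0 ≤ x) (hy0 : 0 ≤ y) :
    pvGet (stepFin image t i g b) x y =
      if x = i ∧ y = b ∧ Csum image t i b ≠ 0 then
        PySem.Int.floordiv (Ssum image t i b) (Csum image t i b)
      else pvGet g x y := by
  unfold stepFin
  by_cases hc : Csum image t i b ≠ 0
  · simp only [if_pos hc]
    by_cases hxy : x = i ∧ y = b
    · obtain ⟨hx, hy⟩ := hxy
      subst hx; subst hy
      have hilen : x.toNat < g.length := by
        have := hs.1; simp only [pvMi] at him; omega
      have hjlen : y.toNat < (g[x.toNat]'hilen).length := by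
        have h2 : x.toNat < image.length := by simp only [pvMi] at him; omega
        have e1 := hs.2 x.toNat hilen h2
        have e2 := pre_rows image t hpre x.toNat h2
        simp only [pvNi, Nn] at hbn e2 ⊢
        omega
      simp only [pvGet]
      rw [rd_modify_eq g 0 _ hx0 hy0 hilen hjlen]
      simp [hc]
    · have hne : x ≠ i ∨ y ≠ b := by tauto
      simp only [pvGet]
      rw [rd_modify_ne g 0 _ hx0 hy0 hi0 hb0 hne, if_neg (by tauto)]
  · simp only [if_neg hc]
    rw [not_not] at hc
    simp [hc]

theorem finH (image : List (List Int)) (t : Int) (hpre : Pre_resultGrid image t)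
    (i : Int) (hi0 : 0 ≤ i) (him : i < pvMi image) :
    ∀ (bs : List Int), (∀ b ∈ bs, 0 ≤ b ∧ b < pvNi image) → ∀ g, RShape image g →
      RShape image (bs.foldl (stepFin image t i) g) ∧
      ∀ (x y : Int), 0 ≤ x → x < pvMi image → 0 ≤ y →
        pvGet (bs.foldl (stepFin image t i) g) x y =
          if x = i ∧ y ∈ bs ∧ Csum image t x y ≠ 0 then
            PySem.Int.floordiv (Ssum image t x y) (Csum image t x y)
          else pvGet g x y := by
  intro bs
  induction bs with
  | nil =>
    intro hbs g hs
    exact ⟨hs, by intro x y _ _ _; simp⟩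
  | cons b bs ih =>
    intro hbs g hs
    obtain ⟨hb0, hbn⟩ := hbs b List.mem_cons_self
    simp only [List.foldl_cons]
    obtain ⟨ihs, ihr⟩ := ih (fun d hd => hbs d (List.mem_cons_of_mem _ hd))
      (stepFin image t i g b) (stepFin_shape image t i b g hs)
    refine ⟨ihs, ?_⟩
    intro x y hx0 hxm hy0
    rw [ihr x y hx0 hxm hy0,
      stepFin_read image t hpre i b x y g hs hi0 him hb0 hbn hx0 hy0]
    by_cases hx : x = i
    · subst hx
      by_cases hyb : y = b
      · subst hyb
        by_cases hcond : Csum image t x y ≠ 0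
        · simp only [List.mem_cons, true_and]
          split_ifs <;> simp_all
        · simp_all
      · simp [List.mem_cons, hyb]
    · simp [hx]

theorem finA (image : List (List Int)) (t : Int) (hpre : Pre_resultGrid image t) :
    ∀ (as : List Int), (∀ a ∈ as, 0 ≤ a ∧ a < pvMi image) → ∀ g, RShape image g →
      RShape image (as.foldl (fun out i =>
        (PySem.List.pyRange 0 (pvNi image)).foldl (stepFin image t i) out) g) ∧
      ∀ (x y : Int), 0 ≤ x → x < pvMi image → 0 ≤ y →
        pvGet (as.foldl (fun out i =>
          (PySem.List.pyRange 0 (pvNi image)).foldl (stepFin image t i) out) g) x y =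
          if x ∈ as ∧ y < pvNi image ∧ Csum image t x y ≠ 0 then
            PySem.Int.floordiv (Ssum image t x y) (Csum image t x y)
          else pvGet g x y := by
  intro as
  induction as with
  | nil =>
    intro has g hs
    exact ⟨hs, by intro x y _ _ _; simp⟩
  | cons a as ih =>
    intro has g hs
    obtain ⟨ha0, ham⟩ := has a List.mem_cons_self
    have hbs : ∀ b ∈ PySem.List.pyRange 0 (pvNi image), 0 ≤ b ∧ b < pvNi image := by
      intro b hb
      rw [PySem.List.mem_pyRange_one] at hb
      omega
    simp only [List.foldl_cons]
    obtain ⟨hs1, hr1⟩ := finH image t hpre a ha0 ham _ hbs g hs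
    obtain ⟨ihs, ihr⟩ := ih (fun d hd => has d (List.mem_cons_of_mem _ hd)) _ hs1
    refine ⟨ihs, ?_⟩
    intro x y hx0 hxm hy0
    rw [ihr x y hx0 hxm hy0, hr1 x y hx0 hxm hy0]
    simp only [PySem.List.mem_pyRange_one, List.mem_cons]
    by_cases hrest : y < pvNi image ∧ Csum image t x y ≠ 0
    · by_cases hxas : x ∈ as
      · rw [if_pos (by tauto), if_pos (by tauto)]
      · by_cases hxa : x = a
        · rw [if_neg (by tauto), if_pos (by tauto), if_pos (by tauto)]
        · rw [if_neg (by tauto), if_neg (by tauto), if_neg (by tauto)]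
    · rw [if_neg (by tauto), if_neg (by tauto), if_neg (by tauto)]

-- per-cell specification of the output
def outSpecD (image : List (List Int)) (t x y : Int) : Int :=
  if y < pvNi image ∧ Csum image t x y ≠ 0 then
    PySem.Int.floordiv (Ssum image t x y) (Csum image t x y)
  else pvGet image x y

theorem A_char (image : List (List Int)) (t : Int) (hpre : Pre_resultGrid image t) :
    RShape image (resultGrid image t) ∧
    ∀ (x y : Int), 0 ≤ x → x < pvMi image → 0 ≤ y →
      pvGet (resultGrid image t) x y = outSpecD image t x y := by
  have hA : resultGrid image t =
      (PySem.List.pyRange 0 (pvMi image)).foldl (fun out i =>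
        (PySem.List.pyRange 0 (pvNi image)).foldl (fun out j =>
          if (rdp (resD image t) i j).2 ≠ 0 then
            pvModify out i j (fun _ =>
              PySem.Int.floordiv (rdp (resD image t) i j).1 (rdp (resD image t) i j).2)
          else out) out) image := rfl
  have hcongr : (PySem.List.pyRange 0 (pvMi image)).foldl (fun out i =>
      (PySem.List.pyRange 0 (pvNi image)).foldl (fun out j =>
        if (rdp (resD image t) i j).2 ≠ 0 then
          pvModify out i j (fun _ =>
            PySem.Int.floordiv (rdp (resD image t) i j).1 (rdp (resD image t) i j).2)
        else out) out) image =
      (PySem.List.pyRange 0 (pvMi image)).foldl (fun out i =>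
        (PySem.List.pyRange 0 (pvNi image)).foldl (stepFin image t i) out) image := by
    refine PySem.List.foldl_congr_mem _ _ _ _ ?_
    intro out i hi
    rw [PySem.List.mem_pyRange_one] at hi
    refine PySem.List.foldl_congr_mem _ _ _ _ ?_
    intro out2 j hj
    rw [PySem.List.mem_pyRange_one] at hj
    rw [(resD_char image t).2 i j hi.1 hi.2 hj.1 hj.2]
    rfl
  have hshape0 : RShape image image := ⟨rfl, fun k h1 h2 => rfl⟩
  have has : ∀ a ∈ PySem.List.pyRange 0 (pvMi image), 0 ≤ a ∧ a < pvMi image := by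
    intro a ha
    rw [PySem.List.mem_pyRange_one] at ha
    omega
  obtain ⟨hs, hr⟩ := finA image t hpre (PySem.List.pyRange 0 (pvMi image)) has image hshape0
  rw [hA, hcongr]
  refine ⟨hs, ?_⟩
  intro x y hx0 hxm hy0
  rw [hr x y hx0 hxm hy0]
  simp only [outSpecD]
  by_cases hrest : y < pvNi image ∧ Csum image t x y ≠ 0
  · simp [hrest, hx0, hxm]
  · simp [hrest, hx0, hxm]
-- ===== B's run-length tables =====

def hspecN (image : List (List Int)) (t i : Int) : Nat → Int
  | 0 => 0
  | k+1 => if |pvGet image i ((k : Int)+1) - pvGet image i (k : Int)| > t then 0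
           else hspecN image t i k + 1

def vspecN (image : List (List Int)) (t : Int) : Nat → Int → Int
  | 0, _ => 0
  | i+1, j => if |pvGet image ((i : Int)+1) j - pvGet image (i : Int) j| > t then 0
              else vspecN image t i j + 1

theorem hspecN_nonneg (image : List (List Int)) (t i : Int) (k : Nat) :
    0 ≤ hspecN image t i k := by
  induction k with
  | zero => simp [hspecN]
  | succ k ih => simp only [hspecN]; split <;> omega

theorem vspecN_nonneg (image : List (List Int)) (t : Int) (k : Nat) (j : Int) :
    0 ≤ vspecN image t k j := by
  induction k with
  | zero => simp [vspecN]
  | succ k ih => simp only [vspecN]; split <;> omega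

theorem hspec_ge2 (image : List (List Int)) (t i : Int) (k : Nat) :
    (2 ≤ hspecN image t i (k+2)) ↔
      (okH image t i ((k : Int)+1) = true ∧ okH image t i ((k : Int)+2) = true) := by
  have h0 := hspecN_nonneg image t i k
  have c1 : ((k : Int) + 1 + 1) = (k : Int) + 2 := by ring
  have c2 : ((k : Int) + 2 - 1) = (k : Int) + 1 := by ring
  have c3 : ((k : Int) + 1 - 1) = (k : Int) := by ring
  simp only [hspecN, okH, Nat.cast_add, Nat.cast_one, c1, c2, c3, decide_eq_true_eq]
  split_ifs <;> constructor <;> intro h <;> simp_all <;> omega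

theorem vspec_ge2 (image : List (List Int)) (t : Int) (k : Nat) (j : Int) :
    (2 ≤ vspecN image t (k+2) j) ↔
      (okV image t ((k : Int)+1) j = true ∧ okV image t ((k : Int)+2) j = true) := by
  have h0 := vspecN_nonneg image t k j
  have c1 : ((k : Int) + 1 + 1) = (k : Int) + 2 := by ring
  have c2 : ((k : Int) + 2 - 1) = (k : Int) + 1 := by ring
  have c3 : ((k : Int) + 1 - 1) = (k : Int) := by ring
  simp only [vspecN, okV, Nat.cast_add, Nat.cast_one, c1, c2, c3, decide_eq_true_eq]
  split_ifs <;> constructor <;> intro h <;> simp_all <;> omega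

-- the partial horizontal run-length row (first J entries)
def runRowP (image : List (List Int)) (t i : Int) (J : Int) : List Int :=
  (PySem.List.pyRange 0 J).foldl (fun r j =>
    r ++ [if j = 0 ∨ |pvGet image i j - pvGet image i (j - 1)| > t then 0
          else PySem.List.pyGetD r (j - 1) 0 + 1]) []

theorem runRowP_succ (image : List (List Int)) (t i : Int) (J : Nat) :
    runRowP image t i ((J : Int) + 1) = runRowP image t i (J : Int) ++
      [if (J : Int) = 0 ∨ |pvGet image i (J : Int) - pvGet image i ((J : Int) - 1)| > t then 0
       else PySem.List.pyGetD (runRowP image t i (J : Int)) ((J : Int) - 1) 0 + 1] := by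
  unfold runRowP
  rw [PySem.List.pyRange_one_succ_right (by positivity), List.foldl_append,
      List.foldl_cons, List.foldl_nil]

theorem runRow_spec (image : List (List Int)) (t i : Int) :
    ∀ (J : Nat), (runRowP image t i (J : Int)).length = J ∧
      (∀ (k : Nat), k < J → (runRowP image t i (J : Int)).getD k 0 = hspecN image t i k) := by
  intro J
  induction J with
  | zero =>
    rw [show ((0 : Nat) : Int) = 0 from rfl]
    unfold runRowP
    rw [PySem.List.pyRange_one_eq_nil (by norm_num)]
    exact ⟨rfl, by omega⟩
  | succ J ih =>
    obtain ⟨ihl, ihr⟩ := ih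
    have hcast : ((J + 1 : Nat) : Int) = (J : Int) + 1 := by push_cast; ring
    rw [hcast, runRowP_succ]
    constructor
    · simp [ihl]
    · intro k hk
      by_cases hkJ : k < J
      · rw [List.getD_eq_getElem?_getD, List.getElem?_append_left (by omega),
            ← List.getD_eq_getElem?_getD]
        exact ihr k hkJ
      · have hkeq : k = J := by omega
        subst hkeq
        rw [List.getD_eq_getElem?_getD, List.getElem?_append_right (by omega), ihl]
        simp only [Nat.sub_self, List.getElem?_cons_zero, Option.getD_some]
        cases k with
        | zero => simp [hspecN]
        | succ K =>
          have hc : ((K + 1 : Nat) : Int) - 1 = (K : Int) := by push_cast; ring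
          have hc2 : ((K + 1 : Nat) : Int) = (K : Int) + 1 := by push_cast; ring
          have hget : PySem.List.pyGetD (runRowP image t i ((K + 1 : Nat) : Int))
              (((K + 1 : Nat) : Int) - 1) 0 = hspecN image t i K := by
            rw [hc, PySem.List.pyGetD_of_nonneg _ _ (by positivity)]
            simp only [Int.toNat_natCast]
            exact ihr K (by omega)
          rw [hget, hc, hc2]
          have hni : ¬((K : Int) + 1 = 0) := by omega
          simp [hspecN, hni]
-- the partial vertical run-length table (first I rows)
def vrunP (image : List (List Int)) (t n : Int) (I : Int) : List (List Int) :=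
  (PySem.List.pyRange 0 I).foldl (fun v i =>
    v ++ [(PySem.List.pyRange 0 n).foldl (fun c j =>
      c ++ [if i = 0 ∨ |pvGet image i j - pvGet image (i - 1) j| > t then 0
            else PySem.List.pyGetD (PySem.List.pyGetD v (i - 1) []) j 0 + 1]) []]) []

theorem vrunP_succ (image : List (List Int)) (t n : Int) (I : Nat) :
    vrunP image t n ((I : Int) + 1) = vrunP image t n (I : Int) ++
      [(PySem.List.pyRange 0 n).map (fun j =>
        if (I : Int) = 0 ∨ |pvGet image (I : Int) j - pvGet image ((I : Int) - 1) j| > t then 0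
        else PySem.List.pyGetD (PySem.List.pyGetD (vrunP image t n (I : Int)) ((I : Int) - 1) []) j 0 + 1)] := by
  unfold vrunP
  rw [PySem.List.pyRange_one_succ_right (by positivity), List.foldl_append,
      List.foldl_cons, List.foldl_nil, PySem.List.foldl_append_singleton_eq_map,
      List.nil_append]

theorem vrun_spec (image : List (List Int)) (t : Int) :
    ∀ (I : Nat), (vrunP image t (pvNi image) (I : Int)).length = I ∧
      (∀ (i : Nat), i < I → (vrunP image t (pvNi image) (I : Int)).getD i [] =
        (PySem.List.pyRange 0 (pvNi image)).map (fun j => vspecN image t i j)) := by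
  intro I
  induction I with
  | zero =>
    rw [show ((0 : Nat) : Int) = 0 from rfl]
    unfold vrunP
    rw [PySem.List.pyRange_one_eq_nil (le_refl (0 : Int))]
    exact ⟨rfl, by omega⟩
  | succ I ih =>
    obtain ⟨ihl, ihr⟩ := ih
    have hcast : ((I + 1 : Nat) : Int) = (I : Int) + 1 := by push_cast; ring
    rw [hcast, vrunP_succ]
    constructor
    · simp [ihl]
    · intro i hi
      by_cases hiI : i < I
      · rw [List.getD_eq_getElem?_getD, List.getElem?_append_left (by omega),
            ← List.getD_eq_getElem?_getD]
        exact ihr i hiI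
      · have hieq : i = I := by omega
        subst hieq
        rw [List.getD_eq_getElem?_getD, List.getElem?_append_right (by omega), ihl]
        simp only [Nat.sub_self, List.getElem?_cons_zero, Option.getD_some]
        refine List.map_congr_left ?_
        intro j hj
        rw [PySem.List.mem_pyRange_one] at hj
        cases i with
        | zero => simp [vspecN]
        | succ K =>
          have hc : ((K + 1 : Nat) : Int) - 1 = (K : Int) := by push_cast; ring
          have hc2 : ((K + 1 : Nat) : Int) = (K : Int) + 1 := by push_cast; ring
          have hrow : PySem.List.pyGetD (vrunP image t (pvNi image) ((K + 1 : Nat) : Int))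
              (((K + 1 : Nat) : Int) - 1) [] =
              (PySem.List.pyRange 0 (pvNi image)).map (fun j => vspecN image t K j) := by
            rw [hc, PySem.List.pyGetD_of_nonneg _ _ (by positivity)]
            simp only [Int.toNat_natCast]
            exact ihr K (by omega)
          rw [hrow, PySem.List.pyGetD_map_pyRange_of_nonneg _ _ _ _ hj.1 hj.2, hc, hc2]
          have hni : ¬((K : Int) + 1 = 0) := by omega
          simp [vspecN, hni]

theorem hrun_read (image : List (List Int)) (t a b : Int) (ha0 : 0 ≤ a) (ham : a < pvMi image)
    (hb0 : 0 ≤ b) (hbn : b < pvNi image) :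
    pvGet (pvHrun image t (pvNi image)) a b = hspecN image t a b.toNat := by
  have hH : pvHrun image t (pvNi image) =
      (PySem.List.pyRange 0 (pvMi image)).map (fun i => runRowP image t i (pvNi image)) := by
    unfold pvHrun
    rw [PySem.List.foldl_append_singleton_eq_map, List.nil_append]
    rfl
  unfold pvGet
  rw [hH, PySem.List.pyGetD_map_pyRange_of_nonneg _ _ _ _ ha0 ham,
      PySem.List.pyGetD_of_nonneg _ _ hb0]
  have : pvNi image = ((Nn image : Nat) : Int) := rfl
  rw [this]
  exact (runRow_spec image t a (Nn image)).2 b.toNat (by simp only [pvNi] at hbn; simp only [Nn]; omega)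

theorem vrun_read (image : List (List Int)) (t a b : Int) (ha0 : 0 ≤ a) (ham : a < pvMi image)
    (hb0 : 0 ≤ b) (hbn : b < pvNi image) :
    pvGet (pvVrun image t (pvNi image)) a b = vspecN image t a.toNat b := by
  have hV : pvVrun image t (pvNi image) = vrunP image t (pvNi image) ((image.length : Nat) : Int) := rfl
  unfold pvGet
  rw [hV, PySem.List.pyGetD_of_nonneg _ _ ha0,
      (vrun_spec image t image.length).2 a.toNat (by simp only [pvMi] at ham; omega),
      PySem.List.pyGetD_map_pyRange_of_nonneg _ _ _ _ hb0 hbn]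
theorem win_read (image : List (List Int)) (t a b : Int) (ha0 : 0 ≤ a)
    (ham : a < pvMi image - 2) (hb0 : 0 ≤ b) (hbn : b < pvNi image - 2) :
    pvGetO (pvWin image t) a b =
      if validW image t a b = true then some (avgW image a b) else none := by
  have hW : pvWin image t =
      (PySem.List.pyRange 0 (pvMi image - 2)).foldl (fun w a =>
        w ++ [(PySem.List.pyRange 0 (pvNi image - 2)).foldl (fun wr b =>
          wr ++ [if pvGet (pvHrun image t (pvNi image)) a (b + 2) ≥ 2 ∧
                    pvGet (pvHrun image t (pvNi image)) (a + 1) (b + 2) ≥ 2 ∧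
                    pvGet (pvHrun image t (pvNi image)) (a + 2) (b + 2) ≥ 2 ∧
                    pvGet (pvVrun image t (pvNi image)) (a + 2) b ≥ 2 ∧
                    pvGet (pvVrun image t (pvNi image)) (a + 2) (b + 1) ≥ 2 ∧
                    pvGet (pvVrun image t (pvNi image)) (a + 2) (b + 2) ≥ 2 then
                   some (avgW image a b)
                 else none]) []]) [] := rfl
  rw [hW]
  unfold pvGetO
  rw [PySem.List.foldl_append_singleton_eq_map, List.nil_append,
      PySem.List.pyGetD_map_pyRange_of_nonneg _ _ _ _ ha0 ham,
      PySem.List.foldl_append_singleton_eq_map, List.nil_append,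
      PySem.List.pyGetD_map_pyRange_of_nonneg _ _ _ _ hb0 hbn]
  refine if_congr ?_ rfl rfl
  have hb2 : (b + 2).toNat = b.toNat + 2 := by omega
  have ha2 : (a + 2).toNat = a.toNat + 2 := by omega
  have hbc : ((b.toNat : Nat) : Int) = b := Int.toNat_of_nonneg hb0
  have hac : ((a.toNat : Nat) : Int) = a := Int.toNat_of_nonneg ha0
  rw [hrun_read image t a (b + 2) ha0 (by omega) (by omega) (by omega),
      hrun_read image t (a + 1) (b + 2) (by omega) (by omega) (by omega) (by omega),
      hrun_read image t (a + 2) (b + 2) (by omega) (by omega) (by omega) (by omega),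
      vrun_read image t (a + 2) b (by omega) (by omega) hb0 (by omega),
      vrun_read image t (a + 2) (b + 1) (by omega) (by omega) (by omega) (by omega),
      vrun_read image t (a + 2) (b + 2) (by omega) (by omega) (by omega) (by omega),
      hb2, ha2]
  simp only [ge_iff_le, hspec_ge2, vspec_ge2, hbc, hac]
  simp only [validW, Bool.and_eq_true]
  constructor
  · rintro ⟨⟨x1, x2⟩, ⟨x3, x4⟩, ⟨x5, x6⟩, ⟨y1, y2⟩, ⟨y3, y4⟩, ⟨y5, y6⟩⟩
    tauto
  · rintro ⟨⟨⟨⟨⟨⟨⟨⟨⟨⟨⟨x1, x2⟩, x3⟩, x4⟩, x5⟩, x6⟩, y1⟩, y2⟩, y3⟩, y4⟩, y5⟩, y6⟩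
    tauto
theorem foldl_pair_add {γ : Type} (l : List γ) (F G : γ → Int) :
    ∀ (s : Int × Int), l.foldl (fun sc e => (sc.1 + F e, sc.2 + G e)) s
      = (s.1 + (l.map F).sum, s.2 + (l.map G).sum) := by
  induction l with
  | nil => intro s; simp
  | cons e l ih =>
    intro s
    simp only [List.foldl_cons, List.map_cons, List.sum_cons]
    rw [ih]
    refine Prod.ext ?_ ?_ <;> simp <;> ring

theorem sum_restrict (f : Int → Int) (lo hi Mx : Int) (h0 : 0 ≤ lo) (hlh : lo ≤ hi)
    (hhM : hi ≤ Mx) (hz : ∀ c, 0 ≤ c → c < Mx → (c < lo ∨ hi ≤ c) → f c = 0) :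
    ((PySem.List.pyRange 0 Mx).map f).sum = ((PySem.List.pyRange lo hi).map f).sum := by
  rw [PySem.List.pyRange_one_append 0 lo Mx h0 (by omega),
      PySem.List.pyRange_one_append lo hi Mx hlh hhM,
      List.map_append, List.map_append, List.sum_append, List.sum_append]
  have z1 : ((PySem.List.pyRange 0 lo).map f).sum = 0 := by
    apply List.sum_eq_zero
    intro v hv
    simp only [List.mem_map] at hv
    obtain ⟨c, hc, rfl⟩ := hv
    rw [PySem.List.mem_pyRange_one] at hc
    exact hz c hc.1 (by omega) (by omega)
  have z2 : ((PySem.List.pyRange hi Mx).map f).sum = 0 := by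
    apply List.sum_eq_zero
    intro v hv
    simp only [List.mem_map] at hv
    obtain ⟨c, hc, rfl⟩ := hv
    rw [PySem.List.mem_pyRange_one] at hc
    exact hz c (by omega) hc.2 (by omega)
  rw [z1, z2]
  ring

theorem gather_eq (image : List (List Int)) (t x y : Int) (hx0 : 0 ≤ x)
    (hxm : x < pvMi image) (hy0 : 0 ≤ y) (hyn : y < pvNi image) :
    ((PySem.List.pyRange (max (x - 2) 0) (min x (pvMi image - 3) + 1)).foldl (fun sc a =>
      (PySem.List.pyRange (max (y - 2) 0) (min y (pvNi image - 3) + 1)).foldl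
        (fun (sc : Int × Int) b =>
          match pvGetO (pvWin image t) a b with
          | some v => (sc.1 + v, sc.2 + 1)
          | none => sc) sc) ((0 : Int), (0 : Int)))
      = (Ssum image t x y, Csum image t x y) := by
  by_cases hm : 3 ≤ pvMi image
  · by_cases hn : 3 ≤ pvNi image
    · -- main case: every window index in the candidate rectangle is in range
      have hcongr1 : ((PySem.List.pyRange (max (x - 2) 0) (min x (pvMi image - 3) + 1)).foldl (fun sc a =>
          (PySem.List.pyRange (max (y - 2) 0) (min y (pvNi image - 3) + 1)).foldl
            (fun (sc : Int × Int) b =>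
              match pvGetO (pvWin image t) a b with
              | some v => (sc.1 + v, sc.2 + 1)
              | none => sc) sc) ((0 : Int), (0 : Int)))
          = ((PySem.List.pyRange (max (x - 2) 0) (min x (pvMi image - 3) + 1)).foldl (fun sc a =>
          (PySem.List.pyRange (max (y - 2) 0) (min y (pvNi image - 3) + 1)).foldl
            (fun (sc : Int × Int) b =>
              (sc.1 + dS image t x y a b, sc.2 + dC image t x y a b)) sc) ((0 : Int), (0 : Int))) := by
        refine PySem.List.foldl_congr_mem _ _ _ _ ?_
        intro sc a ha
        rw [PySem.List.mem_pyRange_one] at ha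
        refine PySem.List.foldl_congr_mem _ _ _ _ ?_
        intro sc2 b hb
        rw [PySem.List.mem_pyRange_one] at hb
        rw [win_read image t a b (by omega) (by omega) (by omega) (by omega)]
        by_cases hv : validW image t a b = true
        · rw [if_pos hv]
          have hd1 : dS image t x y a b = avgW image a b := by
            rw [dS, if_pos ⟨hv, by omega, by omega, by omega, by omega⟩]
          have hd2 : dC image t x y a b = 1 := by
            rw [dC, if_pos ⟨hv, by omega, by omega, by omega, by omega⟩]
          rw [hd1, hd2]
        · rw [if_neg hv]
          have hd1 : dS image t x y a b = 0 := by rw [dS, if_neg (by tauto)]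
          have hd2 : dC image t x y a b = 0 := by rw [dC, if_neg (by tauto)]
          rw [hd1, hd2]
          simp
      rw [hcongr1]
      have hcongr2 : ((PySem.List.pyRange (max (x - 2) 0) (min x (pvMi image - 3) + 1)).foldl (fun sc a =>
          (PySem.List.pyRange (max (y - 2) 0) (min y (pvNi image - 3) + 1)).foldl
            (fun (sc : Int × Int) b =>
              (sc.1 + dS image t x y a b, sc.2 + dC image t x y a b)) sc) ((0 : Int), (0 : Int)))
          = ((PySem.List.pyRange (max (x - 2) 0) (min x (pvMi image - 3) + 1)).foldl (fun sc a =>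
              (sc.1 + ((PySem.List.pyRange (max (y - 2) 0) (min y (pvNi image - 3) + 1)).map
                  (fun b => dS image t x y a b)).sum,
               sc.2 + ((PySem.List.pyRange (max (y - 2) 0) (min y (pvNi image - 3) + 1)).map
                  (fun b => dC image t x y a b)).sum)) ((0 : Int), (0 : Int))) := by
        refine PySem.List.foldl_congr_mem _ _ _ _ ?_
        intro sc a _
        exact foldl_pair_add _ _ _ sc
      rw [hcongr2, foldl_pair_add]
      have hSin : ∀ a, 0 ≤ a → a < pvMi image - 2 →
          ((PySem.List.pyRange 0 (pvNi image - 2)).map (fun b => dS image t x y a b)).sum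
          = ((PySem.List.pyRange (max (y - 2) 0) (min y (pvNi image - 3) + 1)).map
              (fun b => dS image t x y a b)).sum := by
        intro a _ _
        refine sum_restrict _ _ _ _ (by omega) (by omega) (by omega) ?_
        intro c h1 h2 h3
        rw [dS, if_neg]
        rintro ⟨-, -, -, u3, u4⟩
        omega
      have hCin : ∀ a, 0 ≤ a → a < pvMi image - 2 →
          ((PySem.List.pyRange 0 (pvNi image - 2)).map (fun b => dC image t x y a b)).sum
          = ((PySem.List.pyRange (max (y - 2) 0) (min y (pvNi image - 3) + 1)).map
              (fun b => dC image t x y a b)).sum := by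
        intro a _ _
        refine sum_restrict _ _ _ _ (by omega) (by omega) (by omega) ?_
        intro c h1 h2 h3
        rw [dC, if_neg]
        rintro ⟨-, -, -, u3, u4⟩
        omega
      have hS : ((PySem.List.pyRange (max (x - 2) 0) (min x (pvMi image - 3) + 1)).map
          (fun a => ((PySem.List.pyRange (max (y - 2) 0) (min y (pvNi image - 3) + 1)).map
            (fun b => dS image t x y a b)).sum)).sum = Ssum image t x y := by
        rw [Ssum]
        rw [sum_restrict (fun a => ((PySem.List.pyRange 0 (pvNi image - 2)).map
            (fun b => dS image t x y a b)).sum) (max (x - 2) 0) (min x (pvMi image - 3) + 1)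
            (pvMi image - 2) (by omega) (by omega) (by omega) ?_]
        · refine congrArg List.sum (List.map_congr_left ?_)
          intro a ha
          rw [PySem.List.mem_pyRange_one] at ha
          exact (hSin a (by omega) (by omega)).symm
        · intro c h1 h2 h3
          apply List.sum_eq_zero
          intro v hv
          simp only [List.mem_map] at hv
          obtain ⟨b, hb, rfl⟩ := hv
          rw [dS, if_neg]
          rintro ⟨-, u1, u2, -, -⟩
          omega
      have hC : ((PySem.List.pyRange (max (x - 2) 0) (min x (pvMi image - 3) + 1)).map
          (fun a => ((PySem.List.pyRange (max (y - 2) 0) (min y (pvNi image - 3) + 1)).map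
            (fun b => dC image t x y a b)).sum)).sum = Csum image t x y := by
        rw [Csum]
        rw [sum_restrict (fun a => ((PySem.List.pyRange 0 (pvNi image - 2)).map
            (fun b => dC image t x y a b)).sum) (max (x - 2) 0) (min x (pvMi image - 3) + 1)
            (pvMi image - 2) (by omega) (by omega) (by omega) ?_]
        · refine congrArg List.sum (List.map_congr_left ?_)
          intro a ha
          rw [PySem.List.mem_pyRange_one] at ha
          exact (hCin a (by omega) (by omega)).symm
        · intro c h1 h2 h3
          apply List.sum_eq_zero
          intro v hv
          simp only [List.mem_map] at hv
          obtain ⟨b, hb, rfl⟩ := hv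
          rw [dC, if_neg]
          rintro ⟨-, u1, u2, -, -⟩
          omega
      rw [hS, hC]
      simp
    · -- fewer than three columns: no window exists on either side
      have h2 : PySem.List.pyRange (max (y - 2) 0) (min y (pvNi image - 3) + 1) = [] :=
        PySem.List.pyRange_one_eq_nil (by omega)
      have h1 : PySem.List.pyRange 0 (pvNi image - 2) = [] :=
        PySem.List.pyRange_one_eq_nil (by omega)
      rw [h2]
      simp only [List.foldl_nil]
      rw [PySem.List.foldl_ignore]
      simp [Ssum, Csum, h1]
  · -- fewer than three rows: no window exists on either side
    have h2 : PySem.List.pyRange (max (x - 2) 0) (min x (pvMi image - 3) + 1) = [] :=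
      PySem.List.pyRange_one_eq_nil (by omega)
    have h1 : PySem.List.pyRange 0 (pvMi image - 2) = [] :=
      PySem.List.pyRange_one_eq_nil (by omega)
    rw [h2]
    simp [Ssum, Csum, h1]
theorem row_set_ne (r : List Int) (v : Int) {b y : Int} (hy0 : 0 ≤ y) (hb0 : 0 ≤ b)
    (hne : y ≠ b) :
    PySem.List.pyGetD (PySem.List.pySetD r b v) y 0 = PySem.List.pyGetD r y 0 := by
  have h2 : b.toNat ≠ y.toNat := by omega
  rw [PySem.List.pySetD_of_nonneg _ _ hb0, PySem.List.pyGetD_of_nonneg _ _ hy0,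
      PySem.List.pyGetD_of_nonneg _ _ hy0, List.getD_eq_getElem?_getD,
      List.getD_eq_getElem?_getD, List.getElem?_set]
  simp [h2]

theorem row_set_eq (r : List Int) (v : Int) {b : Int} (hb0 : 0 ≤ b)
    (hlen : b.toNat < r.length) :
    PySem.List.pyGetD (PySem.List.pySetD r b v) b 0 = v := by
  rw [PySem.List.pySetD_of_nonneg _ _ hb0, PySem.List.pyGetD_of_nonneg _ _ hb0,
      List.getD_eq_getElem?_getD, List.getElem?_set]
  simp [hlen]

-- the canonical per-cell step of B's gather pass
def stepC (image : List (List Int)) (t x : Int) (row : List Int) (y : Int) : List Int :=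
  if Csum image t x y ≠ 0 then
    PySem.List.pySetD row y (PySem.Int.floordiv (Ssum image t x y) (Csum image t x y))
  else row

theorem stepC_read (image : List (List Int)) (t x b y : Int) (r : List Int)
    (hlen : Nn image ≤ r.length) (hb0 : 0 ≤ b) (hbn : b < pvNi image) (hy0 : 0 ≤ y) :
    PySem.List.pyGetD (stepC image t x r b) y 0 =
      if y = b ∧ Csum image t x b ≠ 0 then
        PySem.Int.floordiv (Ssum image t x b) (Csum image t x b)
      else PySem.List.pyGetD r y 0 := by
  unfold stepC
  by_cases hc : Csum image t x b ≠ 0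
  · rw [if_pos hc]
    by_cases hyb : y = b
    · subst hyb
      rw [row_set_eq r _ hy0 (by simp only [pvNi, Nn] at hbn hlen ⊢; omega),
          if_pos ⟨rfl, hc⟩]
    · rw [row_set_ne r _ hy0 hb0 hyb, if_neg (by tauto)]
  · rw [if_neg hc, if_neg (by tauto)]

theorem stepC_len (image : List (List Int)) (t x b : Int) (r : List Int) :
    (stepC image t x r b).length = r.length := by
  unfold stepC
  split
  · rw [PySem.List.length_pySetD]
  · rfl

theorem rowFold (image : List (List Int)) (t x : Int) :
    ∀ (bs : List Int), (∀ b ∈ bs, 0 ≤ b ∧ b < pvNi image) → ∀ (r : List Int),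
      Nn image ≤ r.length →
      (bs.foldl (stepC image t x) r).length = r.length ∧
      ∀ (y : Int), 0 ≤ y → PySem.List.pyGetD (bs.foldl (stepC image t x) r) y 0 =
        if y ∈ bs ∧ Csum image t x y ≠ 0 then
          PySem.Int.floordiv (Ssum image t x y) (Csum image t x y)
        else PySem.List.pyGetD r y 0 := by
  intro bs
  induction bs with
  | nil =>
    intro hbs r hr
    exact ⟨rfl, by intro y _; simp⟩
  | cons b bs ih =>
    intro hbs r hr
    obtain ⟨hb0, hbn⟩ := hbs b List.mem_cons_self
    simp only [List.foldl_cons]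
    obtain ⟨ihl, ihr⟩ := ih (fun d hd => hbs d (List.mem_cons_of_mem _ hd))
      (stepC image t x r b) (by rw [stepC_len]; exact hr)
    refine ⟨by rw [ihl, stepC_len], ?_⟩
    intro y hy0
    rw [ihr y hy0, stepC_read image t x b y r hr hb0 hbn hy0]
    simp only [List.mem_cons]
    by_cases hyb : y = b
    · subst hyb
      by_cases hcond : Csum image t x y ≠ 0
      · by_cases hmem : y ∈ bs
        · rw [if_pos (show y ∈ bs ∧ Csum image t x y ≠ 0 from ⟨hmem, hcond⟩),
              if_pos (show (y = y ∨ y ∈ bs) ∧ Csum image t x y ≠ 0 from ⟨Or.inl rfl, hcond⟩)]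
        · rw [if_neg (show ¬(y ∈ bs ∧ Csum image t x y ≠ 0) from by tauto),
              if_pos (show y = y ∧ Csum image t x y ≠ 0 from ⟨rfl, hcond⟩),
              if_pos (show (y = y ∨ y ∈ bs) ∧ Csum image t x y ≠ 0 from ⟨Or.inl rfl, hcond⟩)]
      · rw [if_neg (show ¬(y ∈ bs ∧ Csum image t x y ≠ 0) from by tauto),
            if_neg (show ¬(y = y ∧ Csum image t x y ≠ 0) from by tauto),
            if_neg (show ¬((y = y ∨ y ∈ bs) ∧ Csum image t x y ≠ 0) from by tauto)]
    · by_cases hmem : y ∈ bs ∧ Csum image t x y ≠ 0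
      · rw [if_pos hmem, if_pos (show (y = b ∨ y ∈ bs) ∧ Csum image t x y ≠ 0 from ⟨Or.inr hmem.1, hmem.2⟩)]
      · rw [if_neg hmem, if_neg (show ¬(y = b ∧ Csum image t x b ≠ 0) from by tauto),
            if_neg (show ¬((y = b ∨ y ∈ bs) ∧ Csum image t x y ≠ 0) from by tauto)]

theorem B_char (image : List (List Int)) (t : Int) (hpre : Pre_resultGrid image t) :
    RShape image (resultGrid_alt image t) ∧
    ∀ (x y : Int), 0 ≤ x → x < pvMi image → 0 ≤ y →
      pvGet (resultGrid_alt image t) x y = outSpecD image t x y := by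
  have hB : resultGrid_alt image t =
      (PySem.List.pyRange 0 (pvMi image)).foldl (fun out x =>
        out ++ [(PySem.List.pyRange 0 (pvNi image)).foldl (fun row y =>
          if (((PySem.List.pyRange (max (x - 2) 0) (min x (pvMi image - 3) + 1)).foldl (fun sc a =>
            (PySem.List.pyRange (max (y - 2) 0) (min y (pvNi image - 3) + 1)).foldl
              (fun (sc : Int × Int) b =>
                match pvGetO (pvWin image t) a b with
                | some v => (sc.1 + v, sc.2 + 1)
                | none => sc) sc) ((0 : Int), (0 : Int))).2 ≠ 0) then
            PySem.List.pySetD row y (PySem.Int.floordiv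
              ((PySem.List.pyRange (max (x - 2) 0) (min x (pvMi image - 3) + 1)).foldl (fun sc a =>
                (PySem.List.pyRange (max (y - 2) 0) (min y (pvNi image - 3) + 1)).foldl
                  (fun (sc : Int × Int) b =>
                    match pvGetO (pvWin image t) a b with
                    | some v => (sc.1 + v, sc.2 + 1)
                    | none => sc) sc) ((0 : Int), (0 : Int))).1
              ((PySem.List.pyRange (max (x - 2) 0) (min x (pvMi image - 3) + 1)).foldl (fun sc a =>
                (PySem.List.pyRange (max (y - 2) 0) (min y (pvNi image - 3) + 1)).foldl
                  (fun (sc : Int × Int) b =>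
                    match pvGetO (pvWin image t) a b with
                    | some v => (sc.1 + v, sc.2 + 1)
                    | none => sc) sc) ((0 : Int), (0 : Int))).2)
          else row) (PySem.List.pyGetD image x [])]) [] := rfl
  have hrowc : ∀ x : Int, 0 ≤ x → x < pvMi image → ∀ r : List Int,
      (PySem.List.pyRange 0 (pvNi image)).foldl (fun row y =>
          if (((PySem.List.pyRange (max (x - 2) 0) (min x (pvMi image - 3) + 1)).foldl (fun sc a =>
            (PySem.List.pyRange (max (y - 2) 0) (min y (pvNi image - 3) + 1)).foldl
              (fun (sc : Int × Int) b =>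
                match pvGetO (pvWin image t) a b with
                | some v => (sc.1 + v, sc.2 + 1)
                | none => sc) sc) ((0 : Int), (0 : Int))).2 ≠ 0) then
            PySem.List.pySetD row y (PySem.Int.floordiv
              ((PySem.List.pyRange (max (x - 2) 0) (min x (pvMi image - 3) + 1)).foldl (fun sc a =>
                (PySem.List.pyRange (max (y - 2) 0) (min y (pvNi image - 3) + 1)).foldl
                  (fun (sc : Int × Int) b =>
                    match pvGetO (pvWin image t) a b with
                    | some v => (sc.1 + v, sc.2 + 1)
                    | none => sc) sc) ((0 : Int), (0 : Int))).1
              ((PySem.List.pyRange (max (x - 2) 0) (min x (pvMi image - 3) + 1)).foldl (fun sc a =>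
                (PySem.List.pyRange (max (y - 2) 0) (min y (pvNi image - 3) + 1)).foldl
                  (fun (sc : Int × Int) b =>
                    match pvGetO (pvWin image t) a b with
                    | some v => (sc.1 + v, sc.2 + 1)
                    | none => sc) sc) ((0 : Int), (0 : Int))).2)
          else row) r
        = (PySem.List.pyRange 0 (pvNi image)).foldl (stepC image t x) r := by
    intro x hx0 hxm r
    refine PySem.List.foldl_congr_mem _ _ _ _ ?_
    intro row y hy
    rw [PySem.List.mem_pyRange_one] at hy
    rw [gather_eq image t x y hx0 hxm hy.1 hy.2]
    rfl
  have hBmap : resultGrid_alt image t =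
      (PySem.List.pyRange 0 (pvMi image)).map (fun x =>
        (PySem.List.pyRange 0 (pvNi image)).foldl (stepC image t x) (PySem.List.pyGetD image x [])) := by
    rw [hB, PySem.List.foldl_append_singleton_eq_map, List.nil_append]
    refine List.map_congr_left ?_
    intro x hx
    rw [PySem.List.mem_pyRange_one] at hx
    exact hrowc x hx.1 hx.2 _
  have hbs : ∀ b ∈ PySem.List.pyRange 0 (pvNi image), 0 ≤ b ∧ b < pvNi image := by
    intro b hb
    rw [PySem.List.mem_pyRange_one] at hb
    omega
  have hrow0 : ∀ (k : Nat) (hk : k < image.length),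
      PySem.List.pyGetD image ((k : Nat) : Int) [] = image[k]'hk := by
    intro k hk
    rw [PySem.List.pyGetD_eq_getElem _ _ (by positivity) (by exact_mod_cast hk)]
    simp
  constructor
  · rw [hBmap]
    constructor
    · simp [PySem.List.length_pyRange_one, pvMi]
    · intro k h1 h2
      have hlen : (PySem.List.pyRange 0 (pvMi image)).length = image.length := by
        simp [PySem.List.length_pyRange_one, pvMi]
      rw [List.getElem_map]
      rw [PySem.List.getElem_pyRange_one, zero_add]
      rw [hrow0 k (by simpa [hlen] using (by rwa [List.length_map, hlen] at h1 : k < image.length))]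
      exact (rowFold image t ((k : Nat) : Int) _ hbs _
        (pre_rows image t hpre k _)).1
  · intro x y hx0 hxm hy0
    rw [hBmap]
    unfold pvGet
    rw [PySem.List.pyGetD_map_pyRange_of_nonneg _ _ _ _ hx0 hxm]
    have hrow0' : PySem.List.pyGetD image x [] = image[x.toNat]'(by simp only [pvMi] at hxm; omega) := by
      rw [PySem.List.pyGetD_eq_getElem _ _ hx0 (by simp only [pvMi] at hxm; exact_mod_cast hxm)]
    rw [(rowFold image t x _ hbs (PySem.List.pyGetD image x [])
        (by rw [hrow0']; exact pre_rows image t hpre x.toNat _)).2 y hy0]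
    simp only [PySem.List.mem_pyRange_one, outSpecD]
    by_cases hrest : y < pvNi image ∧ Csum image t x y ≠ 0
    · rw [if_pos (by tauto), if_pos (by tauto)]
    · rw [if_neg (by tauto), if_neg (by tauto)]
      rfl

theorem rd_getElem (g : List (List Int)) (k l : Nat) (hk : k < g.length)
    (hl : l < (g[k]'hk).length) :
    pvGet g ((k : Nat) : Int) ((l : Nat) : Int) = (g[k]'hk)[l]'hl := by
  have h1 : PySem.List.pyGetD g ((k : Nat) : Int) [] = g[k]'hk := by
    rw [PySem.List.pyGetD_eq_getElem _ _ (by positivity) (by exact_mod_cast hk)]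
    simp
  unfold pvGet
  rw [h1, PySem.List.pyGetD_eq_getElem _ _ (by positivity) (by exact_mod_cast hl)]
  simp
theorem resultGrid_eq_alt (image : List (List Int)) (threshold : Int)
    (hpre : Pre_resultGrid image threshold) :
    resultGrid image threshold = resultGrid_alt image threshold := by
  obtain ⟨hsA, hrA⟩ := A_char image threshold hpre
  obtain ⟨hsB, hrB⟩ := B_char image threshold hpre
  apply List.ext_getElem (by rw [hsA.1, hsB.1])
  intro k h1 h2
  have hkim : k < image.length := by rw [hsA.1] at h1; exact h1
  apply List.ext_getElem (by rw [hsA.2 k h1 hkim, hsB.2 k h2 hkim])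
  intro l hl1 hl2
  have hkM : ((k : Nat) : Int) < pvMi image := by simp only [pvMi]; exact_mod_cast hkim
  rw [← rd_getElem _ k l h1 hl1, ← rd_getElem _ k l h2 hl2,
      hrA ((k : Nat) : Int) ((l : Nat) : Int) (by positivity) hkM (by positivity),
      hrB ((k : Nat) : Int) ((l : Nat) : Int) (by positivity) hkM (by positivity)]

-- ===== VERDICT (by name: the statement is the Claim_ definition above) =====
theorem resultGrid_spec : Claim_equal_resultGrid := by
  intro image threshold _ hpre
  unfold Spec_resultGrid
  exact resultGrid_eq_alt image threshold hpre
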